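-- pv_equiv track=rewrite | github.com/cstainsby/HockeyDataProject | src/mysklearn/myutils.py | find_count_and_index_positions_of_each_col_items
-- ===== SOURCE A (Python) =====
-- def find_count_and_index_positions_of_each_col_items(table_without_labels):
--     """
--     for each column, find the list of values and each index they can be found at
--         list of dictionary of value(key) -> list of indices(instance number)
--     NOTE: this will return the columns in the same order they were passed in"""
--     list_of_value_index_dict = []
--
--     if len(table_without_labels) > 0:
--         for i in range(0, len(table_without_labels[0])):
--             # itterate through each col
--             value_index_dict = {}
--
--             for j in range(0, len(table_without_labels)):
--                 # itterate through each instance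
--                 current_value_in_instance = table_without_labels[j][i]
--                 if list(value_index_dict.keys()).count(current_value_in_instance) == 0:
--                     # if new value encountered, add a new key and list
--                     new_index_list = [j]
--                     value_index_dict[current_value_in_instance] = new_index_list
--                 else:
--                     # otherwise add the current index to its value
--                     value_index_dict[current_value_in_instance].append(j)
--
--             list_of_value_index_dict.append(value_index_dict)
--
--     return list_of_value_index_dict
-- ===== SOURCE B (Python) =====
-- def find_count_and_index_positions_of_each_col_items(table_without_labels):
--     """Staged per column: extract the column, compute its distinct values in
--     first-occurrence order, then build each value's index list with a separate
--     gathering pass (no incremental dict-of-lists updates)."""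
--     result = []
--     if len(table_without_labels) > 0:
--         for i in range(len(table_without_labels[0])):
--             col = [row[i] for row in table_without_labels]
--             result.append({v: [j for j, w in enumerate(col) if w == v]
--                            for v in dict.fromkeys(col)})
--     return result
-- ===== Notes on version B (the rewrite author's own statement) =====
-- stated objective: alternative
-- what changed: Replaced A's incremental per-cell dict building (scan list(d.keys()) for every cell, then insert a new list or append to an existing one) by a staged per-column computation: extract the column, dedup it to the distinct values in first-occurrence order, then build each value's index list with one gathering comprehension per value.
import Mathlib
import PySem

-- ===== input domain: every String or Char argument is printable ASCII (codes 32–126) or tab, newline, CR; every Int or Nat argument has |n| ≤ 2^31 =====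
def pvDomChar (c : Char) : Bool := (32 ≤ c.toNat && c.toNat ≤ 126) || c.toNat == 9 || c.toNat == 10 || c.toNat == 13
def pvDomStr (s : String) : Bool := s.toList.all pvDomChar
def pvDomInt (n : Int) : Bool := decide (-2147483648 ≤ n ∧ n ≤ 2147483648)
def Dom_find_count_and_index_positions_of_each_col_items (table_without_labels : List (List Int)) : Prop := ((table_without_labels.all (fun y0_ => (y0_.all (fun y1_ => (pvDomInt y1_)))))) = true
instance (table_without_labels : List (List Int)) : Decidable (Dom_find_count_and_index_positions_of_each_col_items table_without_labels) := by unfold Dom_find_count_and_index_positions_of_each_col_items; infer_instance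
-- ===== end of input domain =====

-- B replaces A's incremental dict-of-lists construction (key-list scan + insert-or-append
-- per cell) by a staged per-column computation: distinct values first, then one gathering
-- pass per value; return value only.

-- ===== PORT A =====
-- one column's dict: for j in range(len(table)): scan keys, insert [j] or append j
def pvAColDict (table_without_labels : List (List Int)) (i : Nat) :
    PySem.Dict Int (List Int) :=
  (List.range table_without_labels.length).foldl
    (fun d j =>
      let v := (table_without_labels.getD j []).getD i 0
      if (PySem.Dict.keys d).count v == 0 then
        d.insert v [(j : Int)]
      else
        d.modify v [] (fun l => l ++ [(j : Int)]))
    PySem.Dict.empty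

def find_count_and_index_positions_of_each_col_items (table_without_labels : List (List Int)) : List (List (Int × List Int)) :=
  if 0 < table_without_labels.length then
    (List.range (table_without_labels.headD []).length).map
      (fun i => (pvAColDict table_without_labels i).items)
  else []

-- ===== PORT B =====
-- '[j for j, w in enumerate(col) if w == v]'
def pvBGather (col : List Int) (v : Int) : List Int :=
  (PySem.List.enumerate col).filterMap (fun p => if p.2 == v then some p.1 else none)

-- 'col = [row[i] for row in table]; {v: gather(v) for v in dict.fromkeys(col)}.items()'
def pvBColItems (table_without_labels : List (List Int)) (i : Nat) : List (Int × List Int) :=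
  let col := table_without_labels.map (fun row => row.getD i 0)
  ((PySem.List.dedup col).foldl
      (fun d v => d.insert v (pvBGather col v)) PySem.Dict.empty).items

def find_count_and_index_positions_of_each_col_items_alt (table_without_labels : List (List Int)) : List (List (Int × List Int)) :=
  if 0 < table_without_labels.length then
    (List.range (table_without_labels.headD []).length).map
      (fun i => pvBColItems table_without_labels i)
  else []

-- ===== PRECONDITION & SPEC =====
-- Pre_ excludes ragged tables with a row shorter than the first row, on which A
-- (and B) raise IndexError.
def Pre_find_count_and_index_positions_of_each_col_items (table_without_labels : List (List Int)) : Prop :=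
  ∀ row ∈ table_without_labels, (table_without_labels.headD []).length ≤ row.length
instance (table_without_labels : List (List Int)) : Decidable (Pre_find_count_and_index_positions_of_each_col_items table_without_labels) := by unfold Pre_find_count_and_index_positions_of_each_col_items; infer_instance

def pvWitness_find_count_and_index_positions_of_each_col_items : List (List Int) := [[1, 2], [1, 3], [4, 2]]

def Spec_find_count_and_index_positions_of_each_col_items (table_without_labels : List (List Int)) (out : List (List (Int × List Int))) : Prop := out = find_count_and_index_positions_of_each_col_items_alt table_without_labels
instance (table_without_labels : List (List Int)) (out : List (List (Int × List Int))) : Decidable (Spec_find_count_and_index_positions_of_each_col_items table_without_labels out) := by unfold Spec_find_count_and_index_positions_of_each_col_items; infer_instance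

-- ===== CLAIM (what is proved, stated in full; the proofs are below) =====
def Claim_equal_find_count_and_index_positions_of_each_col_items : Prop := ∀ (table_without_labels : List (List Int)), Dom_find_count_and_index_positions_of_each_col_items table_without_labels → Pre_find_count_and_index_positions_of_each_col_items table_without_labels → Spec_find_count_and_index_positions_of_each_col_items table_without_labels (find_count_and_index_positions_of_each_col_items table_without_labels)

-- ===== LEMMAS AND PROOFS =====

-- A's per-cell step is unconditionally a modify-append (new keys append in a dict)
theorem pv_stepA_eq_modify (d : PySem.Dict Int (List Int)) (v j : Int) :
    (if (PySem.Dict.keys d).count v == 0 then d.insert v [j]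
     else d.modify v [] (fun l => l ++ [j])) = d.modify v [] (fun l => l ++ [j]) := by
  by_cases h : v ∈ d.keys
  · have : (PySem.Dict.keys d).count v ≠ 0 := by
      simp [List.count_eq_zero]; exact h
    simp [this]
  · have hc0 : (PySem.Dict.keys d).count v = 0 := List.count_eq_zero.mpr h
    have hcont : d.contains v = false := by
      rw [PySem.Dict.contains_eq_decide_mem_keys]; simp [h]
    simp [hc0, PySem.Dict.modify, PySem.Dict.getD_of_not_contains d ([] : List Int) hcont]

-- the (value, index) pairs A processes, row by row, within column i
def pvPairs (table_without_labels : List (List Int)) (i : Nat) : List (Int × Int) :=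
  (List.range table_without_labels.length).map
    (fun j => ((table_without_labels.getD j []).getD i 0, (j : Int)))

theorem pvAColDict_eq_foldl_pairs (t : List (List Int)) (i : Nat) :
    pvAColDict t i
      = (pvPairs t i).foldl (fun d p => d.modify p.1 [] (fun l => l ++ [p.2]))
          PySem.Dict.empty := by
  unfold pvAColDict pvPairs
  rw [List.foldl_map]
  exact PySem.List.foldl_congr_mem' _ _ _ _ (fun j _ d => pv_stepA_eq_modify d _ _)

-- the same pairs, via enumerate of the extracted column
theorem pvPairs_eq_enumerate (t : List (List Int)) (i : Nat) :
    pvPairs t i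
      = (PySem.List.enumerate (t.map (fun row => row.getD i 0))).map
          (fun p => (p.2, p.1)) := by
  apply List.ext_getElem
  · simp [pvPairs, PySem.List.length_enumerate]
  · intro j h1 h2
    simp [pvPairs, PySem.List.getElem_enumerate, List.getD_eq_getElem?_getD,
      (by simpa [pvPairs] using h1 : j < t.length)]

-- filter-after-swap is the gather comprehension
theorem pv_filter_swap_eq_filterMap (l : List (Int × Int)) (v : Int) :
    ((l.map (fun p => (p.2, p.1))).filter (fun p => p.1 == v)).map (fun p => p.2)
      = l.filterMap (fun p => if p.2 == v then some p.1 else none) := by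
  induction l with
  | nil => rfl
  | cons p l ih =>
    by_cases h : p.2 = v <;> simp [h, ih]

-- per-column equality of the two constructions
theorem pv_col_eq (t : List (List Int)) (i : Nat) :
    (pvAColDict t i).items = pvBColItems t i := by
  unfold pvBColItems
  have hpairs := pvPairs_eq_enumerate t i
  set col := t.map (fun row => row.getD i 0) with hcol
  -- the A-side dict as a fold of modify-appends
  rw [pvAColDict_eq_foldl_pairs]
  set F := fun (d : PySem.Dict Int (List Int)) (p : Int × Int) =>
      d.modify p.1 [] (fun l => l ++ [p.2]) with hF
  -- its keys are the distinct column values in order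
  have hkeys : ((pvPairs t i).foldl F PySem.Dict.empty).keys = PySem.List.dedup col := by
    rw [hF]
    rw [PySem.Dict.keys_foldl_modify_key (pvPairs t i) (fun p => p.1) []
      (fun d p => (fun l => l ++ [p.2])) PySem.Dict.empty]
    have hmap : (pvPairs t i).map (fun p => p.1) = col := by
      rw [hpairs, List.map_map]
      exact PySem.List.map_snd_enumerate col 0
    rw [hmap, PySem.List.dedup_eq_ofList]
    rfl
  have hnodup : ((pvPairs t i).foldl F PySem.Dict.empty).keys.Nodup := by
    rw [hkeys]; exact PySem.List.nodup_dedup col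
  -- A's items via the keys
  rw [PySem.Dict.items_eq_map_keys _ hnodup []]
  rw [hkeys]
  -- B's items: inserts over fresh distinct keys
  rw [PySem.Dict.items_foldl_insert_fresh (PySem.List.dedup col) (fun v => v)
      (fun v => pvBGather col v) PySem.Dict.empty
      (by intro a _; exact PySem.Dict.contains_empty a)
      (by simp)]
  rw [show (PySem.Dict.empty : PySem.Dict Int (List Int)).items = [] from rfl,
    List.nil_append]
  apply List.map_congr_left
  intro v _
  -- each value's list: A's accumulated appends = B's gather pass
  have := PySem.Dict.getD_foldl_modify_append (pvPairs t i) PySem.Dict.empty v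
  rw [hF]
  rw [this, PySem.Dict.getD_empty, List.nil_append, hpairs,
    pv_filter_swap_eq_filterMap]
  rfl

theorem pv_main_eq (t : List (List Int)) :
    find_count_and_index_positions_of_each_col_items t
      = find_count_and_index_positions_of_each_col_items_alt t := by
  unfold find_count_and_index_positions_of_each_col_items
    find_count_and_index_positions_of_each_col_items_alt
  split
  · exact List.map_congr_left (fun i _ => pv_col_eq t i)
  · rfl

-- ===== VERDICT (by name: the statement is the Claim_ definition above) =====
theorem find_count_and_index_positions_of_each_col_items_spec : Claim_equal_find_count_and_index_positions_of_each_col_items := by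
  intro t _ _
  unfold Spec_find_count_and_index_positions_of_each_col_items
  exact pv_main_eq t
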